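-- pv_equiv track=rewrite | github.com/danielkongcau-del/MaskGen | partition_gen/manual_split_validator.py | summarize_split_validation
-- ===== SOURCE A (Python) =====
-- from typing import Dict, Iterable, List, Sequence
--
-- def summarize_split_validation(rows: Iterable[dict]) -> Dict[str, object]:
--     rows = list(rows)
--     return {
--         "sample_count": int(len(rows)),
--         "valid_count": int(sum(1 for row in rows if bool(row.get("split_valid")))),
--         "invalid_count": int(sum(1 for row in rows if not bool(row.get("split_valid")))),
--         "missing_geometry_ref_count": int(sum(int(row.get("missing_geometry_ref_count", 0)) for row in rows)),
--         "invalid_relation_ref_count": int(sum(int(row.get("invalid_relation_ref_count", 0)) for row in rows)),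
--         "topology_nodes_with_geometry_payload_count": int(
--             sum(int(row.get("topology_nodes_with_geometry_payload_count", 0)) for row in rows)
--         ),
--     }
-- ===== SOURCE B (Python) =====
-- def summarize_split_validation(rows):
--     rows = list(rows)
--     sample_count = 0
--     valid = 0
--     invalid = 0
--     missing = 0
--     invalid_rel = 0
--     topo = 0
--     for row in rows:
--         sample_count += 1
--         if bool(row.get("split_valid")):
--             valid += 1
--         else:
--             invalid += 1
--         missing += int(row.get("missing_geometry_ref_count", 0))
--         invalid_rel += int(row.get("invalid_relation_ref_count", 0))
--         topo += int(row.get("topology_nodes_with_geometry_payload_count", 0))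
--     return {
--         "sample_count": int(sample_count),
--         "valid_count": int(valid),
--         "invalid_count": int(invalid),
--         "missing_geometry_ref_count": int(missing),
--         "invalid_relation_ref_count": int(invalid_rel),
--         "topology_nodes_with_geometry_payload_count": int(topo),
--     }
-- ===== Notes on version B (the rewrite author's own statement) =====
-- stated objective: simpler
-- what changed: Replaces A's six separate passes over the materialized rows (one len plus five generator-expression sums) by a single loop maintaining six accumulators.
import Mathlib
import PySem

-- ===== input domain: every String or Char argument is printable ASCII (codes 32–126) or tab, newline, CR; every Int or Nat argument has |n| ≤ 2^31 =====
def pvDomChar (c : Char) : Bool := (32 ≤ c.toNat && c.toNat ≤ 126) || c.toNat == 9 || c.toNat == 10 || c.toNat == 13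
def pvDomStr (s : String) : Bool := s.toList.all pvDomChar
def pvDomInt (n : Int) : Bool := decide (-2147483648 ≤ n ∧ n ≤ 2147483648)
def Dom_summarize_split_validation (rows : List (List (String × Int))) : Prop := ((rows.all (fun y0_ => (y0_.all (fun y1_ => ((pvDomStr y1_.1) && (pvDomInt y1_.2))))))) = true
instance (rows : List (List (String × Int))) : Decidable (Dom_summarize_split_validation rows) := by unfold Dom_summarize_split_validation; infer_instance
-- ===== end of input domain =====

-- B replaces A's six separate passes over the rows by one loop carrying six accumulators (objective: simpler).


-- shared primitive: Python's row.get(k, d) / bool(row.get("split_valid")) on a dict row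
def pvGet (row : List (String × Int)) (k : String) (d : Int) : Int :=
  (PySem.Dict.mk row).getD k d

def pvTruthy (row : List (String × Int)) : Bool :=
  match (PySem.Dict.mk row).get? "split_valid" with
  | some v => decide (v ≠ 0)
  | none => false

-- ===== PORT A =====
-- A: len plus five independent generator-sum passes over rows
def summarize_split_validation (rows : List (List (String × Int))) : List (String × Int) :=
  [("sample_count", (rows.length : Int)),
   ("valid_count", ((rows.filter (fun r => pvTruthy r)).map (fun _ => (1 : Int))).sum),
   ("invalid_count", ((rows.filter (fun r => !pvTruthy r)).map (fun _ => (1 : Int))).sum),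
   ("missing_geometry_ref_count", (rows.map (fun r => pvGet r "missing_geometry_ref_count" 0)).sum),
   ("invalid_relation_ref_count", (rows.map (fun r => pvGet r "invalid_relation_ref_count" 0)).sum),
   ("topology_nodes_with_geometry_payload_count", (rows.map (fun r => pvGet r "topology_nodes_with_geometry_payload_count" 0)).sum)]

-- ===== PORT B =====
-- B: one fold over rows carrying six accumulators
def pvStep (st : Int × Int × Int × Int × Int × Int) (r : List (String × Int)) :
    Int × Int × Int × Int × Int × Int :=
  match st with
  | (n, v, iv, m, ir, t) =>
    (n + 1,
     if pvTruthy r then v + 1 else v,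
     if pvTruthy r then iv else iv + 1,
     m + pvGet r "missing_geometry_ref_count" 0,
     ir + pvGet r "invalid_relation_ref_count" 0,
     t + pvGet r "topology_nodes_with_geometry_payload_count" 0)

def summarize_split_validation_alt (rows : List (List (String × Int))) : List (String × Int) :=
  match rows.foldl pvStep (0, 0, 0, 0, 0, 0) with
  | (n, v, iv, m, ir, t) =>
    [("sample_count", n),
     ("valid_count", v),
     ("invalid_count", iv),
     ("missing_geometry_ref_count", m),
     ("invalid_relation_ref_count", ir),
     ("topology_nodes_with_geometry_payload_count", t)]

-- ===== PRECONDITION & SPEC =====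
def Spec_summarize_split_validation (rows : List (List (String × Int))) (out : List (String × Int)) : Prop := out = summarize_split_validation_alt rows
instance (rows : List (List (String × Int))) (out : List (String × Int)) : Decidable (Spec_summarize_split_validation rows out) := by unfold Spec_summarize_split_validation; infer_instance

-- ===== CLAIM (what is proved, stated in full; the proofs are below) =====
def Claim_equal_summarize_split_validation : Prop := ∀ (rows : List (List (String × Int))), Dom_summarize_split_validation rows → Spec_summarize_split_validation rows (summarize_split_validation rows)

-- ===== LEMMAS AND PROOFS =====
lemma pvFold_spec (rows : List (List (String × Int))) (n v iv m ir t : Int) :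
    rows.foldl pvStep (n, v, iv, m, ir, t) =
      (n + rows.length,
       v + ((rows.filter (fun r => pvTruthy r)).map (fun _ => (1 : Int))).sum,
       iv + ((rows.filter (fun r => !pvTruthy r)).map (fun _ => (1 : Int))).sum,
       m + (rows.map (fun r => pvGet r "missing_geometry_ref_count" 0)).sum,
       ir + (rows.map (fun r => pvGet r "invalid_relation_ref_count" 0)).sum,
       t + (rows.map (fun r => pvGet r "topology_nodes_with_geometry_payload_count" 0)).sum) := by
  induction rows generalizing n v iv m ir t with
  | nil => simp
  | cons r rs ih =>
    simp only [List.foldl_cons, pvStep, ih, List.length_cons, List.filter_cons, List.map_cons,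
      List.sum_cons]
    by_cases h : pvTruthy r = true <;>
      simp [h, Prod.ext_iff] <;> push_cast <;> omega

-- ===== VERDICT (by name: the statement is the Claim_ definition above) =====
theorem summarize_split_validation_spec : Claim_equal_summarize_split_validation := by
  intro rows _
  show _ = _
  simp [summarize_split_validation, summarize_split_validation_alt, pvFold_spec]
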